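-- pv_equiv track=rewrite | github.com/asilab/panther | python/NC_HDC.py | match_label
-- ===== SOURCE A (Python) =====
-- def match_label(report_hdc, report_nc, labels):
--     label_matcher=[]
--     for painting_nc in report_nc:
--         for label in labels:
--             if label[0] in painting_nc[0]:
--                 label_matcher.append( [label[0], label[1], painting_nc[1]])
--
--     label_complete=[]
--     for label in label_matcher:
--         for painting_hdc in report_hdc:
--             if label[0] in painting_hdc[0]:
--                 value = label + [painting_hdc[1]]
--                 label_complete.append(value)
--     label_complete.sort(key=lambda x: x[1])
--
--     return label_complete
-- ===== SOURCE B (Python) =====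
-- def match_label(report_hdc, report_nc, labels):
--     out = []
--     hdc_cache = {}
--     for painting_nc in report_nc:
--         for i, label in enumerate(labels):
--             if label[0] in painting_nc[0]:
--                 if i not in hdc_cache:
--                     hdc_cache[i] = [h[1] for h in report_hdc if label[0] in h[0]]
--                 for v in hdc_cache[i]:
--                     out.append([label[0], label[1], painting_nc[1], v])
--     out.sort(key=lambda x: x[1])
--     return out
-- ===== Notes on version B (the rewrite author's own statement) =====
-- stated objective: alternative
-- what changed: B replaces A's build-then-rescan two-pass join (materialise label_matcher, then rescan report_hdc for every entry) by a single pass that memoises, in a dict keyed by label index, the list of matching hdc values, so report_hdc is scanned once per distinct matched label instead of once per (nc,label) match; same stable final sort on x[1].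
import Mathlib
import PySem

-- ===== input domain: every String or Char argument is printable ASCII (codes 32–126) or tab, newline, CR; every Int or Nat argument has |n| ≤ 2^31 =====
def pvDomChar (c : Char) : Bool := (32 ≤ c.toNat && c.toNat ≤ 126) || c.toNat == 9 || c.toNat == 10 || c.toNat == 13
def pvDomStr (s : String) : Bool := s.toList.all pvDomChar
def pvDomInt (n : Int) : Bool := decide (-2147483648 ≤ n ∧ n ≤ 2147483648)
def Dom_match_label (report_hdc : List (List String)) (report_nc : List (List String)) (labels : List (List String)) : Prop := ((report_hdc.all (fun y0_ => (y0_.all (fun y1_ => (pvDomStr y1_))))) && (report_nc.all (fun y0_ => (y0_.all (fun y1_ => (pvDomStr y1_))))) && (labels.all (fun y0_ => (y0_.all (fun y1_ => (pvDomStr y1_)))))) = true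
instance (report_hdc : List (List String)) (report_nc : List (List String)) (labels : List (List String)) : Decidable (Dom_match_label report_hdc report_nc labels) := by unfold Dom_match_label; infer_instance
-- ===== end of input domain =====

-- B replaces A's build-then-rescan two-pass join by a single pass that memoises, per label index in a dict cache, the list of matching hdc values, so report_hdc is scanned once per distinct matched label instead of once per (nc,label) match; objective: alternative. Return value only (A sorts a fresh local list; no argument is mutated by either version).


-- shared total row accessor: row[i] as Python's indexing, defaulted (the default is never reached under Pre_)
def pvRow (xs : List String) (i : Int) : String := PySem.List.pyGetD xs i ""

-- ===== PORT A =====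
def match_label (report_hdc : List (List String)) (report_nc : List (List String)) (labels : List (List String)) : List (List String) :=
  -- label_matcher: first double loop, appending [label[0], label[1], painting_nc[1]]
  -- label_complete: second double loop over the materialised table; then the stable sort on x[1]
  PySem.List.sorted
    ((report_nc.foldl (fun acc painting_nc =>
        labels.foldl (fun acc label =>
          if PySem.Str.isIn (pvRow label 0) (pvRow painting_nc 0) then
            acc ++ [[pvRow label 0, pvRow label 1, pvRow painting_nc 1]]
          else acc) acc) []).foldl (fun acc label =>
      report_hdc.foldl (fun acc painting_hdc =>
        if PySem.Str.isIn (pvRow label 0) (pvRow painting_hdc 0) then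
          acc ++ [label ++ [pvRow painting_hdc 1]]
        else acc) acc) [])
    (fun x => pvRow x 1) false

-- ===== PORT B =====
-- helper: the comprehension '[h[1] for h in report_hdc if label[0] in h[0]]' B caches per label
def pvF (report_hdc : List (List String)) (label : List String) : List String :=
  (report_hdc.filter (fun h => PySem.Str.isIn (pvRow label 0) (pvRow h 0))).map (fun h => pvRow h 1)

-- single pass over report_nc x enumerate(labels); state = (out, hdc_cache keyed by label index)
-- pvStepB is the body of B's inner loop (one (index,label) pair for a fixed painting_nc)
def pvStepB (report_hdc : List (List String)) (painting_nc : List String)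
    (st : List (List String) × PySem.Dict Int (List String)) (il : Int × List String) :
    List (List String) × PySem.Dict Int (List String) :=
  if PySem.Str.isIn (pvRow il.2 0) (pvRow painting_nc 0) then
    let cache := if st.2.contains il.1 then st.2 else st.2.insert il.1 (pvF report_hdc il.2)
    ((cache.getD il.1 []).foldl
        (fun out v => out ++ [[pvRow il.2 0, pvRow il.2 1, pvRow painting_nc 1, v]]) st.1,
     cache)
  else st

def match_label_alt (report_hdc : List (List String)) (report_nc : List (List String)) (labels : List (List String)) : List (List String) :=
  PySem.List.sorted
    ((report_nc.foldl (fun st painting_nc =>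
        (PySem.List.enumerate labels).foldl (pvStepB report_hdc painting_nc) st)
      ([], PySem.Dict.empty)).1)
    (fun x => pvRow x 1) false

-- ===== PRECONDITION & SPEC =====
-- Pre_ excludes exactly the inputs on which A raises IndexError: an empty row of report_nc or labels
-- that the loops actually reach, a matched label/nc row of length < 2, or (once some label matched)
-- an hdc row that is empty or matches with length < 2.
def Pre_match_label (report_hdc : List (List String)) (report_nc : List (List String)) (labels : List (List String)) : Prop :=
  (∀ p ∈ report_nc, ∀ l ∈ labels, p ≠ [] ∧ l ≠ [] ∧
      (PySem.Str.isIn (pvRow l 0) (pvRow p 0) = true → 2 ≤ l.length ∧ 2 ≤ p.length)) ∧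
  ((∃ p ∈ report_nc, ∃ l ∈ labels, PySem.Str.isIn (pvRow l 0) (pvRow p 0) = true) →
    ∀ h ∈ report_hdc, h ≠ [] ∧ ∀ l ∈ labels,
      (∃ p ∈ report_nc, PySem.Str.isIn (pvRow l 0) (pvRow p 0) = true) →
      PySem.Str.isIn (pvRow l 0) (pvRow h 0) = true → 2 ≤ h.length)
instance (report_hdc : List (List String)) (report_nc : List (List String)) (labels : List (List String)) : Decidable (Pre_match_label report_hdc report_nc labels) := by unfold Pre_match_label; infer_instance

def pvWitness_match_label : List (List String) × List (List String) × List (List String) :=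
  ([["apple", "H1"]], [["an apple", "N1"]], [["apple", "fruit"]])

def Spec_match_label (report_hdc : List (List String)) (report_nc : List (List String)) (labels : List (List String)) (out : List (List String)) : Prop := out = match_label_alt report_hdc report_nc labels
instance (report_hdc : List (List String)) (report_nc : List (List String)) (labels : List (List String)) (out : List (List String)) : Decidable (Spec_match_label report_hdc report_nc labels out) := by unfold Spec_match_label; infer_instance

-- ===== CLAIM (what is proved, stated in full; the proofs are below) =====
def Claim_equal_match_label : Prop := ∀ (report_hdc : List (List String)) (report_nc : List (List String)) (labels : List (List String)), Dom_match_label report_hdc report_nc labels → Pre_match_label report_hdc report_nc labels → Spec_match_label report_hdc report_nc labels (match_label report_hdc report_nc labels)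

-- ===== LEMMAS AND PROOFS =====

-- common middle form both ports' accumulated lists reduce to (before the sort)
def pvMid (hdc nc labels : List (List String)) : List (List String) :=
  nc.flatMap (fun p =>
    labels.flatMap (fun lab =>
      if PySem.Str.isIn (pvRow lab 0) (pvRow p 0) then
        (pvF hdc lab).map (fun v => [pvRow lab 0, pvRow lab 1, pvRow p 1, v])
      else []))

theorem pvMid_cons (hdc : List (List String)) (p : List String) (t labels : List (List String)) :
    pvMid hdc (p :: t) labels =
      labels.flatMap (fun lab =>
        if PySem.Str.isIn (pvRow lab 0) (pvRow p 0) then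
          (pvF hdc lab).map (fun v => [pvRow lab 0, pvRow lab 1, pvRow p 1, v])
        else []) ++ pvMid hdc t labels := by
  simp [pvMid]

-- (l.filter p).flatMap q written as the guarded flatMap form
theorem pv_flatMap_filter {α β : Type} (p : α → Bool) (q : α → List β) (l : List α) :
    (l.filter p).flatMap q = l.flatMap (fun x => if p x then q x else []) := by
  induction l with
  | nil => rfl
  | cons a t ih => by_cases h : p a <;> simp [h, ih]

-- cache invariant: every stored value is pvF of the label at that index
def pvInv (hdc labels : List (List String)) (cache : PySem.Dict Int (List String)) : Prop :=
  ∀ (k : Nat) (hk : k < labels.length) v, cache.get? (k : Int) = some v → v = pvF hdc labels[k]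

-- inner loop (over the enumerated labels) of B, for one fixed painting_nc
theorem pv_inner (hdc labels : List (List String)) (p : List String) :
    ∀ (es : List (Int × List String)),
      (∀ e ∈ es, ∃ k : Nat, ∃ hk : k < labels.length, e = ((k : Int), labels[k])) →
      ∀ (out : List (List String)) (cache : PySem.Dict Int (List String)), pvInv hdc labels cache →
      (es.foldl (pvStepB hdc p) (out, cache)).1
        = out ++ es.flatMap (fun e =>
            if PySem.Str.isIn (pvRow e.2 0) (pvRow p 0) then
              (pvF hdc e.2).map (fun v => [pvRow e.2 0, pvRow e.2 1, pvRow p 1, v])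
            else [])
      ∧ pvInv hdc labels (es.foldl (pvStepB hdc p) (out, cache)).2 := by
  intro es
  induction es with
  | nil => intro _ out cache hinv; exact ⟨by simp, hinv⟩
  | cons e t ih =>
    intro hes out cache hinv
    obtain ⟨k, hk, hek⟩ := hes e (List.mem_cons_self ..)
    have ht : ∀ e' ∈ t, ∃ k : Nat, ∃ hk : k < labels.length, e' = ((k : Int), labels[k]) :=
      fun e' he' => hes e' (List.mem_cons_of_mem _ he')
    subst hek
    rw [List.foldl_cons]
    by_cases hmatch : PySem.Str.isIn (pvRow labels[k] 0) (pvRow p 0) = true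
    · -- matched: cache is looked up or filled, rows appended
      by_cases hc : cache.contains ((k : Int)) = true
      · -- cache hit
        have hsome : (cache.get? ((k : Int))).isSome := by
          rw [← PySem.Dict.contains_eq_isSome_get?]; exact hc
        obtain ⟨v, hv⟩ := Option.isSome_iff_exists.mp hsome
        have hget : cache.getD ((k : Int)) [] = pvF hdc labels[k] := by
          rw [PySem.Dict.getD_of_get?_eq_some cache [] hv]; exact hinv k hk v hv
        have hstep : pvStepB hdc p (out, cache) ((k : Int), labels[k])
            = (out ++ (pvF hdc labels[k]).map
                (fun v => [pvRow labels[k] 0, pvRow labels[k] 1, pvRow p 1, v]), cache) := by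
          simp only [pvStepB, hmatch, if_pos, hc, hget,
            PySem.List.foldl_append_singleton_eq_map]
        rw [hstep]
        obtain ⟨h1, h2⟩ := ih ht (out ++ (pvF hdc labels[k]).map
            (fun v => [pvRow labels[k] 0, pvRow labels[k] 1, pvRow p 1, v])) cache hinv
        refine ⟨?_, h2⟩
        rw [h1, List.flatMap_cons]
        dsimp only
        rw [if_pos hmatch, List.append_assoc]
      · -- cache miss: insert, then read back
        have hc' : cache.contains ((k : Int)) = false := by
          cases h : cache.contains ((k : Int)) with
          | false => rfl
          | true => exact absurd h hc
        have hget : (cache.insert ((k : Int)) (pvF hdc labels[k])).getD ((k : Int)) []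
            = pvF hdc labels[k] := PySem.Dict.getD_insert_self ..
        have hinv' : pvInv hdc labels (cache.insert ((k : Int)) (pvF hdc labels[k])) := by
          intro k' hk' v hv
          by_cases hkk : ((k' : Int)) = ((k : Int))
          · have hkknat : k' = k := by exact_mod_cast hkk
            subst hkknat
            rw [hkk, PySem.Dict.get?_insert_self] at hv
            exact (Option.some_inj.mp hv).symm
          · rw [PySem.Dict.get?_insert_of_ne cache _ hkk] at hv
            exact hinv k' hk' v hv
        have hstep : pvStepB hdc p (out, cache) ((k : Int), labels[k])
            = (out ++ (pvF hdc labels[k]).map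
                (fun v => [pvRow labels[k] 0, pvRow labels[k] 1, pvRow p 1, v]),
               cache.insert ((k : Int)) (pvF hdc labels[k])) := by
          simp only [pvStepB, hmatch, if_pos, hc', Bool.false_eq_true, if_false, hget,
            PySem.List.foldl_append_singleton_eq_map]
        rw [hstep]
        obtain ⟨h1, h2⟩ := ih ht (out ++ (pvF hdc labels[k]).map
            (fun v => [pvRow labels[k] 0, pvRow labels[k] 1, pvRow p 1, v]))
            (cache.insert ((k : Int)) (pvF hdc labels[k])) hinv'
        refine ⟨?_, h2⟩
        rw [h1, List.flatMap_cons]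
        dsimp only
        rw [if_pos hmatch, List.append_assoc]
    · -- no match: state unchanged for this label
      have hstep : pvStepB hdc p (out, cache) ((k : Int), labels[k]) = (out, cache) := by
        simp only [pvStepB, hmatch, Bool.false_eq_true, if_false]
      rw [hstep]
      obtain ⟨h1, h2⟩ := ih ht out cache hinv
      refine ⟨?_, h2⟩
      rw [h1, List.flatMap_cons]
      dsimp only
      rw [if_neg hmatch, List.nil_append]

-- B's accumulated list (before the sort) is pvMid
theorem pv_B_core (hdc labels : List (List String)) :
    ∀ (nc : List (List String)) (out : List (List String)) (cache : PySem.Dict Int (List String)),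
      pvInv hdc labels cache →
      (nc.foldl (fun st p => (PySem.List.enumerate labels).foldl (pvStepB hdc p) st)
        (out, cache)).1 = out ++ pvMid hdc nc labels := by
  intro nc
  induction nc with
  | nil => intro out cache _; simp [pvMid]
  | cons p t ih =>
    intro out cache hinv
    have hes : ∀ e ∈ PySem.List.enumerate labels, ∃ k : Nat, ∃ hk : k < labels.length,
        e = ((k : Int), labels[k]) := by
      intro e he
      rw [PySem.List.mem_enumerate_iff] at he
      obtain ⟨k, hk, hek⟩ := he
      exact ⟨k, hk, by simpa using hek⟩
    obtain ⟨h1, h2⟩ := pv_inner hdc labels p (PySem.List.enumerate labels) hes out cache hinv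
    rw [List.foldl_cons,
      ← Prod.mk.eta (p := (PySem.List.enumerate labels).foldl (pvStepB hdc p) (out, cache)),
      ih _ _ h2, h1]
    have hflat : (PySem.List.enumerate labels).flatMap (fun e =>
        if PySem.Str.isIn (pvRow e.2 0) (pvRow p 0) then
          (pvF hdc e.2).map (fun v => [pvRow e.2 0, pvRow e.2 1, pvRow p 1, v])
        else []) = labels.flatMap (fun lab =>
        if PySem.Str.isIn (pvRow lab 0) (pvRow p 0) then
          (pvF hdc lab).map (fun v => [pvRow lab 0, pvRow lab 1, pvRow p 1, v])
        else []) := by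
      conv_rhs => rw [← PySem.List.map_snd_enumerate labels 0]
      rw [List.flatMap_map]
    rw [pvMid_cons, hflat, List.append_assoc]

-- A's accumulated list (before the sort) is pvMid
theorem pv_A_core (hdc nc labels : List (List String)) :
    ((nc.foldl (fun acc p =>
        labels.foldl (fun acc label =>
          if PySem.Str.isIn (pvRow label 0) (pvRow p 0) then
            acc ++ [[pvRow label 0, pvRow label 1, pvRow p 1]]
          else acc) acc) []).foldl (fun acc label =>
        hdc.foldl (fun acc h =>
          if PySem.Str.isIn (pvRow label 0) (pvRow h 0) then
            acc ++ [label ++ [pvRow h 1]]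
          else acc) acc) []) = pvMid hdc nc labels := by
  simp only [PySem.List.foldl_append_if, PySem.List.foldl_append_eq_flatMap, List.nil_append]
  rw [List.flatMap_assoc]
  unfold pvMid
  refine List.flatMap_congr ?_
  intro p _
  rw [List.flatMap_map, ← pv_flatMap_filter]
  refine List.flatMap_congr ?_
  intro lab _
  unfold pvF
  rw [List.map_map]
  refine List.map_congr_left ?_
  intro h _
  simp [pvRow, PySem.List.pyGetD, PySem.List.pyGet?, PySem.List.pyIdx?]

theorem match_label_spec : Claim_equal_match_label := by
  intro hdc nc labels _ _
  unfold Spec_match_label match_label match_label_alt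
  rw [pv_B_core hdc labels nc [] PySem.Dict.empty
      (by intro k hk v hv; simp [PySem.Dict.get?_empty] at hv),
    pv_A_core, List.nil_append]

-- ===== VERDICT (by name: the statement is the Claim_ definition above) =====
-- (proof above; nothing below)
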